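-- pv_equiv track=rewrite | github.com/sathviksimhap/Samsung_Python | Samnsung/assignments/hackerrank.py | arrangeStudents
-- ===== SOURCE A (Python) =====
-- def arrangeStudents(n, boys, girls):
--     # Write your code here
--     assert 1 <= n <= 100
--     assert len(boys) == n and len(girls) == n
--     assert all(1 <= i <= 100 for i in boys + girls)
--
--     boys.sort()
--     girls.sort()
--
--     ans = []
--     for i, j in zip(boys, girls):
--         ans.append(i)
--         ans.append(j)
--
--     if (ans == sorted(ans)):
--         return "YES"
--
--     ans = []
--     for i, j in zip(girls, boys):
--         ans.append(i)
--         ans.append(j)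
--
--     if (ans == sorted(ans)):
--         return "YES"
--
--     return "NO"
-- ===== SOURCE B (Python) =====
-- def arrangeStudents(n, boys, girls):
--     # Same in-place sorts as the original; return-value computed by a direct
--     # single-pass monotonicity check instead of building + sorting the interleave.
--     assert 1 <= n <= 100
--     assert len(boys) == n and len(girls) == n
--     assert all(1 <= i <= 100 for i in boys + girls)
--
--     boys.sort()
--     girls.sort()
--
--     if _chained(boys, girls):
--         return "YES"
--     if _chained(girls, boys):
--         return "YES"
--     return "NO"
--
--
-- def _chained(first, second):
--     # True iff first[0], second[0], first[1], second[1], ... is non-decreasing.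
--     prev = None
--     for a, b in zip(first, second):
--         if prev is not None and a < prev:
--             return False
--         if b < a:
--             return False
--         prev = b
--     return True
-- ===== Notes on version B (the rewrite author's own statement) =====
-- stated objective: simpler
-- what changed: Instead of materialising each interleaved list and comparing it with its sorted copy, B tests each candidate ordering with a single-pass non-decreasing check over the two sorted arrays (prev/current comparisons), eliminating the list build and the extra sort.
import Mathlib
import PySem

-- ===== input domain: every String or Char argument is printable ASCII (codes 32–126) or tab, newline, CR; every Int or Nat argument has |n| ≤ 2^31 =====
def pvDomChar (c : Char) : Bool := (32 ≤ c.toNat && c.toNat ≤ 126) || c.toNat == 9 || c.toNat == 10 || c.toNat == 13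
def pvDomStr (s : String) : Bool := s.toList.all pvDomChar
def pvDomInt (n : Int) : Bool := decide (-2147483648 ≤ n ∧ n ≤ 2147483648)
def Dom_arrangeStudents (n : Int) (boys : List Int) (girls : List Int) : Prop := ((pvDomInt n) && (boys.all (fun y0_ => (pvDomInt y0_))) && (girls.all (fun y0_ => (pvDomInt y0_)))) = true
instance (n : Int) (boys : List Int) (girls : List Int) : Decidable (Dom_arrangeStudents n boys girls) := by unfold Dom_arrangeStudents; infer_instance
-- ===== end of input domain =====

-- B replaces A's build-interleave-then-compare-with-sorted test by a single-pass
-- monotonicity check on the two sorted arrays; return-value equivalence (both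
-- versions sort `boys` and `girls` in place identically).


-- ===== PORT A =====
def arrangeStudents (n : Int) (boys : List Int) (girls : List Int) : String :=
  -- asserts are Pre_arrangeStudents; sorts are the in-place boys.sort()/girls.sort()
  let boys' := PySem.List.sorted boys (fun x => x) false
  let girls' := PySem.List.sorted girls (fun x => x) false
  let ans := (boys'.zip girls').foldl (fun acc p => (acc ++ [p.1]) ++ [p.2]) ([] : List Int)
  if ans = PySem.List.sorted ans (fun x => x) false then "YES"
  else
    let ans2 := (girls'.zip boys').foldl (fun acc p => (acc ++ [p.1]) ++ [p.2]) ([] : List Int)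
    if ans2 = PySem.List.sorted ans2 (fun x => x) false then "YES"
    else "NO"

-- ===== PORT B =====
-- _chained's loop: prev carries the last `b`, early return False on a violation
def chainedAux : Option Int → List (Int × Int) → Bool
  | _, [] => true
  | none, (a, b) :: rest =>          -- prev is None: first guard cannot fire
    if b < a then false
    else chainedAux (some b) rest
  | some p, (a, b) :: rest =>
    if a < p then false
    else if b < a then false
    else chainedAux (some b) rest

def arrangeStudents_alt (n : Int) (boys : List Int) (girls : List Int) : String :=
  let boys' := PySem.List.sorted boys (fun x => x) false
  let girls' := PySem.List.sorted girls (fun x => x) false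
  if chainedAux none (boys'.zip girls') then "YES"
  else if chainedAux none (girls'.zip boys') then "YES"
  else "NO"

-- ===== PRECONDITION & SPEC =====
-- Pre_ is exactly A's asserts (A raises AssertionError outside them)
def Pre_arrangeStudents (n : Int) (boys : List Int) (girls : List Int) : Prop :=
  1 ≤ n ∧ n ≤ 100 ∧ (boys.length : Int) = n ∧ (girls.length : Int) = n ∧
  ∀ x ∈ boys ++ girls, 1 ≤ x ∧ x ≤ 100
instance (n : Int) (boys : List Int) (girls : List Int) : Decidable (Pre_arrangeStudents n boys girls) := by unfold Pre_arrangeStudents; infer_instance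
def pvWitness_arrangeStudents : Int × List Int × List Int := (2, [3, 1], [2, 4])

def Spec_arrangeStudents (n : Int) (boys : List Int) (girls : List Int) (out : String) : Prop := out = arrangeStudents_alt n boys girls
instance (n : Int) (boys : List Int) (girls : List Int) (out : String) : Decidable (Spec_arrangeStudents n boys girls out) := by unfold Spec_arrangeStudents; infer_instance

-- ===== CLAIM (what is proved, stated in full; the proofs are below) =====
def Claim_equal_arrangeStudents : Prop := ∀ (n : Int) (boys : List Int) (girls : List Int), Dom_arrangeStudents n boys girls → Pre_arrangeStudents n boys girls → Spec_arrangeStudents n boys girls (arrangeStudents n boys girls)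

-- ===== LEMMAS AND PROOFS =====

-- A's append loop builds the interleave (flatMap form)
theorem foldl_interleave (L : List (Int × Int)) (acc : List Int) :
    L.foldl (fun acc p => (acc ++ [p.1]) ++ [p.2]) acc
      = acc ++ L.flatMap (fun p => [p.1, p.2]) := by
  induction L generalizing acc with
  | nil => simp
  | cons p rest ih => simp [List.foldl_cons, ih, List.flatMap_def]

-- B's single-pass check decides chained non-decrease of the interleave
theorem chainedAux_iff (L : List (Int × Int)) (prev : Option Int) :
    chainedAux prev L = true ↔
      List.IsChain (· ≤ ·) (prev.toList ++ L.flatMap (fun p => [p.1, p.2])) := by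
  induction L generalizing prev with
  | nil => cases prev <;> simp [chainedAux]
  | cons p rest ih =>
    obtain ⟨a, b⟩ := p
    have hb := ih (some b)
    simp only [Option.toList_some, Option.toList_none, List.flatMap_cons,
      List.cons_append, List.nil_append] at hb ⊢
    cases prev with
    | none =>
      simp only [Option.toList_none, List.nil_append]
      rw [show chainedAux none ((a, b) :: rest)
            = if b < a then false else chainedAux (some b) rest from rfl,
        List.isChain_cons_cons, ← hb]
      by_cases hba : b < a
      · simp only [if_pos hba]
        constructor
        · intro h; simp at h
        · exact fun h => absurd h.1 (by omega)
      · simp only [if_neg hba]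
        constructor
        · exact fun h => ⟨by omega, h⟩
        · exact fun h => h.2
    | some q =>
      simp only [Option.toList_some, List.cons_append, List.nil_append]
      rw [show chainedAux (some q) ((a, b) :: rest)
            = if a < q then false
              else if b < a then false else chainedAux (some b) rest from rfl,
        List.isChain_cons_cons, List.isChain_cons_cons, ← hb]
      by_cases haq : a < q
      · simp only [if_pos haq]
        constructor
        · intro h; simp at h
        · exact fun h => absurd h.1 (by omega)
      · simp only [if_neg haq]
        by_cases hba : b < a
        · simp only [if_pos hba]
          constructor
          · intro h; simp at h
          · exact fun h => absurd h.2.1 (by omega)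
        · simp only [if_neg hba]
          constructor
          · exact fun h => ⟨by omega, by omega, h⟩
          · exact fun h => h.2.2

-- ans == sorted(ans) is exactly chained non-decrease
theorem eq_sorted_iff_chain (l : List Int) :
    l = PySem.List.sorted l (fun x => x) false ↔ List.IsChain (· ≤ ·) l := by
  constructor
  · intro h
    rw [List.isChain_iff_pairwise]
    have := PySem.List.sorted_pairwise l (fun x => x)
    rw [← h] at this
    simpa using this
  · intro h
    have hp : l.Pairwise (· ≤ ·) := List.isChain_iff_pairwise.mp h
    exact (PySem.List.sorted_eq_self_of_pairwise l (fun x => x) (by simpa using hp)).symm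

theorem cond_iff (xs ys : List Int) :
    ((xs.zip ys).foldl (fun acc p => (acc ++ [p.1]) ++ [p.2]) ([] : List Int)
        = PySem.List.sorted ((xs.zip ys).foldl (fun acc p => (acc ++ [p.1]) ++ [p.2]) []) (fun x => x) false)
      ↔ chainedAux none ((xs.zip ys)) = true := by
  rw [eq_sorted_iff_chain, chainedAux_iff]
  simp [foldl_interleave, List.flatMap_def]

-- ===== VERDICT (by name: the statement is the Claim_ definition above) =====
theorem arrangeStudents_spec : Claim_equal_arrangeStudents := by
  intro n boys girls _ _
  unfold Spec_arrangeStudents arrangeStudents arrangeStudents_alt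
  by_cases h1 : chainedAux none
      ((PySem.List.sorted boys (fun x => x) false).zip (PySem.List.sorted girls (fun x => x) false)) = true
  · rw [if_pos ((cond_iff _ _).mpr h1), if_pos h1]
  · rw [if_neg (fun h => h1 ((cond_iff _ _).mp h)), if_neg h1]
    by_cases h2 : chainedAux none
        ((PySem.List.sorted girls (fun x => x) false).zip (PySem.List.sorted boys (fun x => x) false)) = true
    · rw [if_pos ((cond_iff _ _).mpr h2), if_pos h2]
    · rw [if_neg (fun h => h2 ((cond_iff _ _).mp h)), if_neg h2]
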